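-- pv_equiv track=rewrite | github.com/Philip205/Queens | Queens.py | EightQueensAreSafe
-- ===== SOURCE A (Python) =====
-- def CountRow(index, buf):
--     cmp = buf[index];
--     count = 0;
--
--     for i in range(0, 8):
--         if(buf[i] == cmp):
--             count = count + 1;
--
--     return count;
--
-- def CountLeftDiagonal(index, buf):
--     x = index;
--     y = buf[index];
--     count = 0;
--
--     if(x < y):
--         y = y - x;
--         x = 0;
--
--         while(y < 8):
--             if(buf[x] == y):
--                 count = count + 1;
--
--             x = x + 1;
--             y = y + 1;
--     else:
--         x = x - y;
--         y = 0;
--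
--         while(x < 8):
--             if(buf[x] == y):
--                 count = count + 1;
--
--             x = x + 1;
--             y = y + 1;
--
--     return count;
--
-- def CountRightDiagonal(index, buf):
--     x = index;
--     y = buf[index];
--     count = 0;
--
--     if((7 - x) < y):
--         x = x - 7 + y;
--         y = 7;
--
--         while(x < 8):
--             if(buf[x] == y):
--                 count = count + 1;
--
--             x = x + 1;
--             y = y - 1;
--     else:
--         y = y + x;
--         x = 0;
--
--         while(y >= 0):
--             if(buf[x] == y):
--                 count = count + 1;
--
--             x = x + 1;
--             y = y - 1;
--
--     return count;
--
-- def EightQueensAreSafe(buf):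
--     i = 0;
--     count = 0;
--
--     while(i < 8):
--         if(CountRow(i, buf) == 1):
--             if(CountLeftDiagonal(i, buf) == 1):
--                 if(CountRightDiagonal(i, buf) == 1):
--                     count = count + 1;
--         i = i + 1;
--
--     return count;
-- ===== SOURCE B (Python) =====
-- def EightQueensAreSafe(buf):
--     # Precompute occupancy tables: multiplicity of every row value, and the
--     # number of queens sitting on each of the 15 board diagonals of either
--     # direction (each diagonal is walked cell by cell, so only squares of the
--     # board belong to it).  Then one pass over the queens counts those whose
--     # row value and both diagonals hold exactly one queen.
--     rows = {}
--     for x in range(8):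
--         rows[buf[x]] = rows.get(buf[x], 0) + 1
--     ldiag = {}
--     for c in range(-7, 8):          # diagonal y - x == c
--         n = 0
--         for x in range(max(0, -c), min(8, 8 - c)):
--             if buf[x] == x + c:
--                 n += 1
--         ldiag[c] = n
--     rdiag = {}
--     for s in range(0, 15):          # anti-diagonal y + x == s
--         n = 0
--         for x in range(max(0, s - 7), min(8, s + 1)):
--             if buf[x] == s - x:
--                 n += 1
--         rdiag[s] = n
--     count = 0
--     for i in range(8):
--         y = buf[i]
--         if rows.get(y, 0) == 1 and ldiag.get(y - i, 0) == 1 and rdiag.get(y + i, 0) == 1: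
--             count += 1
--     return count
-- ===== Notes on version B (the rewrite author's own statement) =====
-- stated objective: alternative
-- what changed: Replaces A's three per-queen directional scans (row scan plus two geometric diagonal walks per queen) with occupancy tables built up front - row-value multiplicities and one cell-by-cell walk of each of the 15 board diagonals of either direction - followed by a single lookup pass counting queens whose row and both diagonals hold exactly one queen; Pre_ only excludes lists shorter than 8, where A raises IndexError.
import Mathlib
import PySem

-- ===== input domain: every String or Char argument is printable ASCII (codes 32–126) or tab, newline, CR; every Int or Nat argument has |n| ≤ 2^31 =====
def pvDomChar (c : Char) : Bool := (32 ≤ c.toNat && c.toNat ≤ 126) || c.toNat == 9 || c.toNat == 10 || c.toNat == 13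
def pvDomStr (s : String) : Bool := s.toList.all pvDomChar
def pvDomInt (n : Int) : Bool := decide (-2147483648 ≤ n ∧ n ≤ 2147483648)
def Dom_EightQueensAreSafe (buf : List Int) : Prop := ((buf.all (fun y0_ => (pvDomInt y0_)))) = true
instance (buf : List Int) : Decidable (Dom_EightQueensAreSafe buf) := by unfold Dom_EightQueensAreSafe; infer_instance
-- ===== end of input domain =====

-- B replaces A's three per-queen directional board walks by occupancy tables built
-- up front: row-value multiplicities plus one cell-by-cell walk of each of the 15
-- board diagonals of either direction, then a single lookup pass over the queens;
-- same return value on every buf with at least 8 entries (alternative decomposition, no speed claim).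


-- buf[i]; on Pre_ every access either program makes is in range, so the 0 default is never observed
def pvGet (buf : List Int) (i : Int) : Int := (PySem.List.pyGet? buf i).getD 0

-- ===== PORT A =====
def CountRow (index : Int) (buf : List Int) : Int :=
  let cmp := pvGet buf index
  (PySem.List.pyRange 0 8 1).foldl (fun count i => if pvGet buf i = cmp then count + 1 else count) 0

-- 'while y < 8' walk of CountLeftDiagonal (x < y branch)
def cldUpLoop (buf : List Int) : Nat → Int → Int → Int → Int
  | 0, _, _, count => count
  | fuel + 1, x, y, count =>
    if y < 8 then
      cldUpLoop buf fuel (x + 1) (y + 1) (if pvGet buf x = y then count + 1 else count)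
    else count

-- 'while x < 8' walk of CountLeftDiagonal (else branch)
def cldXLoop (buf : List Int) : Nat → Int → Int → Int → Int
  | 0, _, _, count => count
  | fuel + 1, x, y, count =>
    if x < 8 then
      cldXLoop buf fuel (x + 1) (y + 1) (if pvGet buf x = y then count + 1 else count)
    else count

def CountLeftDiagonal (index : Int) (buf : List Int) : Int :=
  let x := index
  let y := pvGet buf index
  if x < y then cldUpLoop buf 8 0 (y - x) 0
  else cldXLoop buf 8 (x - y) 0 0

-- 'while x < 8' walk of CountRightDiagonal ((7 - x) < y branch)
def crdXLoop (buf : List Int) : Nat → Int → Int → Int → Int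
  | 0, _, _, count => count
  | fuel + 1, x, y, count =>
    if x < 8 then
      crdXLoop buf fuel (x + 1) (y - 1) (if pvGet buf x = y then count + 1 else count)
    else count

-- 'while y >= 0' walk of CountRightDiagonal (else branch)
def crdYLoop (buf : List Int) : Nat → Int → Int → Int → Int
  | 0, _, _, count => count
  | fuel + 1, x, y, count =>
    if 0 ≤ y then
      crdYLoop buf fuel (x + 1) (y - 1) (if pvGet buf x = y then count + 1 else count)
    else count

def CountRightDiagonal (index : Int) (buf : List Int) : Int :=
  let x := index
  let y := pvGet buf index
  if 7 - x < y then crdXLoop buf 8 (x - 7 + y) 7 0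
  else crdYLoop buf 8 0 (y + x) 0

-- 'while i < 8' of EightQueensAreSafe
def eqsLoop (buf : List Int) : Nat → Int → Int → Int
  | 0, _, count => count
  | fuel + 1, i, count =>
    if i < 8 then
      eqsLoop buf fuel (i + 1)
        (if CountRow i buf = 1 then
          (if CountLeftDiagonal i buf = 1 then
            (if CountRightDiagonal i buf = 1 then count + 1 else count)
          else count)
        else count)
    else count

def EightQueensAreSafe (buf : List Int) : Int := eqsLoop buf 8 0 0

-- ===== PORT B =====
-- Source B's 'rows' table: multiplicity of each row value
def bRows (buf : List Int) : PySem.Dict Int Int :=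
  (PySem.List.pyRange 0 8 1).foldl
    (fun d x => d.insert (pvGet buf x) (d.getD (pvGet buf x) 0 + 1)) PySem.Dict.empty

-- Source B's inner walk of the left diagonal y - x = c, cell by cell
def ldn (buf : List Int) (c : Int) : Int :=
  (PySem.List.pyRange (max 0 (-c)) (min 8 (8 - c)) 1).foldl
    (fun n x => if pvGet buf x = x + c then n + 1 else n) 0

-- Source B's 'ldiag' table over the 15 left diagonals
def bLdiag (buf : List Int) : PySem.Dict Int Int :=
  (PySem.List.pyRange (-7) 8 1).foldl (fun d c => d.insert c (ldn buf c)) PySem.Dict.empty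

-- Source B's inner walk of the anti-diagonal y + x = s, cell by cell
def rdn (buf : List Int) (s : Int) : Int :=
  (PySem.List.pyRange (max 0 (s - 7)) (min 8 (s + 1)) 1).foldl
    (fun n x => if pvGet buf x = s - x then n + 1 else n) 0

-- Source B's 'rdiag' table over the 15 anti-diagonals
def bRdiag (buf : List Int) : PySem.Dict Int Int :=
  (PySem.List.pyRange 0 15 1).foldl (fun d s => d.insert s (rdn buf s)) PySem.Dict.empty

def EightQueensAreSafe_alt (buf : List Int) : Int :=
  (PySem.List.pyRange 0 8 1).foldl
    (fun count i =>
      if (bRows buf).getD (pvGet buf i) 0 = 1 ∧ (bLdiag buf).getD (pvGet buf i - i) 0 = 1 ∧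
          (bRdiag buf).getD (pvGet buf i + i) 0 = 1 then count + 1 else count) 0

-- ===== PRECONDITION & SPEC =====
-- Python A indexes buf[0..7] unconditionally and raises IndexError on a shorter list
def Pre_EightQueensAreSafe (buf : List Int) : Prop := 8 ≤ buf.length
instance (buf : List Int) : Decidable (Pre_EightQueensAreSafe buf) := by
  unfold Pre_EightQueensAreSafe; infer_instance
def pvWitness_EightQueensAreSafe : List Int := [0, 6, 4, 7, 1, 3, 5, 2]

def Spec_EightQueensAreSafe (buf : List Int) (out : Int) : Prop := out = EightQueensAreSafe_alt buf
instance (buf : List Int) (out : Int) : Decidable (Spec_EightQueensAreSafe buf out) := by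
  unfold Spec_EightQueensAreSafe; infer_instance

-- ===== CLAIM (what is proved, stated in full; the proofs are below) =====
def Claim_equal_EightQueensAreSafe : Prop := ∀ (buf : List Int), Dom_EightQueensAreSafe buf →
  Pre_EightQueensAreSafe buf → Spec_EightQueensAreSafe buf (EightQueensAreSafe buf)

-- ===== LEMMAS AND PROOFS =====

-- reference counts: board occurrences on a row / left diagonal / right diagonal
def rowN (buf : List Int) (v : Int) : Nat :=
  (List.range 8).countP (fun (j : Nat) => decide (pvGet buf (j : Int) = v))
def ldN (buf : List Int) (c : Int) : Nat :=
  (List.range 8).countP (fun (j : Nat) =>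
    decide ((0 ≤ pvGet buf (j : Int) ∧ pvGet buf (j : Int) < 8) ∧ pvGet buf (j : Int) - (j : Int) = c))
def rdN (buf : List Int) (s : Int) : Nat :=
  (List.range 8).countP (fun (j : Nat) =>
    decide ((0 ≤ pvGet buf (j : Int) ∧ pvGet buf (j : Int) < 8) ∧ pvGet buf (j : Int) + (j : Int) = s))
-- A queen is counted iff all three of its table entries are 1
def safeB (buf : List Int) (i : Int) : Bool :=
  decide (rowN buf (pvGet buf i) = 1 ∧ ldN buf (pvGet buf i - i) = 1 ∧ rdN buf (pvGet buf i + i) = 1)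

lemma pyRange8 : PySem.List.pyRange 0 8 1 = (List.range 8).map (fun (k : Nat) => (k : Int)) := by decide

-- a count over range n, re-indexed by an offset, equals a count over range m whose
-- predicate is false outside the shifted window
lemma countP_range_shift (p q : Nat → Bool) (off n m : Nat)
    (hm : off + n ≤ m)
    (h1 : ∀ k, k < n → p k = q (off + k))
    (h2 : ∀ j, j < m → (j < off ∨ off + n ≤ j) → q j = false) :
    (List.range n).countP p = (List.range m).countP q := by
  have hsplit : List.range m =
      (List.range off ++ (List.range n).map (off + ·)) ++
        (List.range (m - off - n)).map (off + n + ·) := by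
    conv_lhs => rw [show m = off + n + (m - off - n) by omega]
    rw [List.range_add, List.range_add]
  rw [hsplit, List.countP_append, List.countP_append, List.countP_map, List.countP_map]
  have hz1 : (List.range off).countP q = 0 := by
    rw [List.countP_eq_zero]
    intro a ha
    simp only [List.mem_range] at ha
    simp [h2 a (by omega) (Or.inl ha)]
  have hz2 : (List.range (m - off - n)).countP (q ∘ (off + n + ·)) = 0 := by
    rw [List.countP_eq_zero]
    intro a ha
    simp only [List.mem_range] at ha
    simp [Function.comp, h2 (off + n + a) (by omega) (Or.inr (by omega))]
  have hc : (List.range n).countP (q ∘ (off + ·)) = (List.range n).countP p := by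
    apply List.countP_congr
    intro x hx
    simp only [List.mem_range] at hx
    simp [Function.comp, h1 x hx]
  omega

-- the four while-loop shapes, as counts over List.range
lemma cldUpLoop_eq (buf : List Int) : ∀ (n fuel : Nat) (x y count : Int), (8 - y).toNat = n → n ≤ fuel →
    cldUpLoop buf fuel x y count = count +
      ((List.range n).countP (fun (k : Nat) => decide (pvGet buf (x + (k:Int)) = y + (k:Int))) : Int) := by
  intro n
  induction n with
  | zero =>
      intro fuel x y count h hf
      cases fuel with
      | zero => simp [cldUpLoop]
      | succ f =>
          rw [show cldUpLoop buf (f + 1) x y count = if y < 8 then cldUpLoop buf f (x + 1) (y + 1) (if pvGet buf x = y then count + 1 else count) else count from rfl, if_neg (by omega)]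
          simp
  | succ n ih =>
      intro fuel x y count h hf
      obtain ⟨f, rfl⟩ : ∃ f, fuel = f + 1 := ⟨fuel - 1, by omega⟩
      rw [show cldUpLoop buf (f + 1) x y count = if y < 8 then cldUpLoop buf f (x + 1) (y + 1) (if pvGet buf x = y then count + 1 else count) else count from rfl, if_pos (by omega), ih f (x + 1) (y + 1) _ (by omega) (by omega)]
      have hp : (List.range n).countP
            (fun (k : Nat) => decide (pvGet buf (x + 1 + (k:Int)) = y + 1 + (k:Int))) =
          (List.range n).countP
            ((fun (k : Nat) => decide (pvGet buf (x + (k:Int)) = y + (k:Int))) ∘ Nat.succ) := by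
        apply List.countP_congr
        intro k _
        have h1 : x + 1 + (k : Int) = x + ((k + 1 : Nat) : Int) := by push_cast; ring
        have h2 : y + 1 + (k : Int) = y + ((k + 1 : Nat) : Int) := by push_cast; ring
        simp [Function.comp, Nat.succ_eq_add_one, h1, h2]
      rw [hp, List.range_succ_eq_map, List.countP_cons, List.countP_map]
      by_cases hg : pvGet buf x = y <;> simp [hg] <;> omega

lemma cldXLoop_eq (buf : List Int) : ∀ (n fuel : Nat) (x y count : Int), (8 - x).toNat = n → n ≤ fuel →
    cldXLoop buf fuel x y count = count +
      ((List.range n).countP (fun (k : Nat) => decide (pvGet buf (x + (k:Int)) = y + (k:Int))) : Int) := by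
  intro n
  induction n with
  | zero =>
      intro fuel x y count h hf
      cases fuel with
      | zero => simp [cldXLoop]
      | succ f =>
          rw [show cldXLoop buf (f + 1) x y count = if x < 8 then cldXLoop buf f (x + 1) (y + 1) (if pvGet buf x = y then count + 1 else count) else count from rfl, if_neg (by omega)]
          simp
  | succ n ih =>
      intro fuel x y count h hf
      obtain ⟨f, rfl⟩ : ∃ f, fuel = f + 1 := ⟨fuel - 1, by omega⟩
      rw [show cldXLoop buf (f + 1) x y count = if x < 8 then cldXLoop buf f (x + 1) (y + 1) (if pvGet buf x = y then count + 1 else count) else count from rfl, if_pos (by omega), ih f (x + 1) (y + 1) _ (by omega) (by omega)]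
      have hp : (List.range n).countP
            (fun (k : Nat) => decide (pvGet buf (x + 1 + (k:Int)) = y + 1 + (k:Int))) =
          (List.range n).countP
            ((fun (k : Nat) => decide (pvGet buf (x + (k:Int)) = y + (k:Int))) ∘ Nat.succ) := by
        apply List.countP_congr
        intro k _
        have h1 : x + 1 + (k : Int) = x + ((k + 1 : Nat) : Int) := by push_cast; ring
        have h2 : y + 1 + (k : Int) = y + ((k + 1 : Nat) : Int) := by push_cast; ring
        simp [Function.comp, Nat.succ_eq_add_one, h1, h2]
      rw [hp, List.range_succ_eq_map, List.countP_cons, List.countP_map]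
      by_cases hg : pvGet buf x = y <;> simp [hg] <;> omega

lemma crdXLoop_eq (buf : List Int) : ∀ (n fuel : Nat) (x y count : Int), (8 - x).toNat = n → n ≤ fuel →
    crdXLoop buf fuel x y count = count +
      ((List.range n).countP (fun (k : Nat) => decide (pvGet buf (x + (k:Int)) = y - (k:Int))) : Int) := by
  intro n
  induction n with
  | zero =>
      intro fuel x y count h hf
      cases fuel with
      | zero => simp [crdXLoop]
      | succ f =>
          rw [show crdXLoop buf (f + 1) x y count = if x < 8 then crdXLoop buf f (x + 1) (y - 1) (if pvGet buf x = y then count + 1 else count) else count from rfl, if_neg (by omega)]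
          simp
  | succ n ih =>
      intro fuel x y count h hf
      obtain ⟨f, rfl⟩ : ∃ f, fuel = f + 1 := ⟨fuel - 1, by omega⟩
      rw [show crdXLoop buf (f + 1) x y count = if x < 8 then crdXLoop buf f (x + 1) (y - 1) (if pvGet buf x = y then count + 1 else count) else count from rfl, if_pos (by omega), ih f (x + 1) (y - 1) _ (by omega) (by omega)]
      have hp : (List.range n).countP
            (fun (k : Nat) => decide (pvGet buf (x + 1 + (k:Int)) = y - 1 - (k:Int))) =
          (List.range n).countP
            ((fun (k : Nat) => decide (pvGet buf (x + (k:Int)) = y - (k:Int))) ∘ Nat.succ) := by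
        apply List.countP_congr
        intro k _
        have h1 : x + 1 + (k : Int) = x + ((k + 1 : Nat) : Int) := by push_cast; ring
        have h2 : y - 1 - (k : Int) = y - ((k + 1 : Nat) : Int) := by push_cast; ring
        simp [Function.comp, Nat.succ_eq_add_one, h1, h2]
      rw [hp, List.range_succ_eq_map, List.countP_cons, List.countP_map]
      by_cases hg : pvGet buf x = y <;> simp [hg] <;> omega

lemma crdYLoop_eq (buf : List Int) : ∀ (n fuel : Nat) (x y count : Int), (y + 1).toNat = n → n ≤ fuel →
    crdYLoop buf fuel x y count = count +
      ((List.range n).countP (fun (k : Nat) => decide (pvGet buf (x + (k:Int)) = y - (k:Int))) : Int) := by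
  intro n
  induction n with
  | zero =>
      intro fuel x y count h hf
      cases fuel with
      | zero => simp [crdYLoop]
      | succ f =>
          rw [show crdYLoop buf (f + 1) x y count = if 0 ≤ y then crdYLoop buf f (x + 1) (y - 1) (if pvGet buf x = y then count + 1 else count) else count from rfl, if_neg (by omega)]
          simp
  | succ n ih =>
      intro fuel x y count h hf
      obtain ⟨f, rfl⟩ : ∃ f, fuel = f + 1 := ⟨fuel - 1, by omega⟩
      rw [show crdYLoop buf (f + 1) x y count = if 0 ≤ y then crdYLoop buf f (x + 1) (y - 1) (if pvGet buf x = y then count + 1 else count) else count from rfl, if_pos (by omega), ih f (x + 1) (y - 1) _ (by omega) (by omega)]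
      have hp : (List.range n).countP
            (fun (k : Nat) => decide (pvGet buf (x + 1 + (k:Int)) = y - 1 - (k:Int))) =
          (List.range n).countP
            ((fun (k : Nat) => decide (pvGet buf (x + (k:Int)) = y - (k:Int))) ∘ Nat.succ) := by
        apply List.countP_congr
        intro k _
        have h1 : x + 1 + (k : Int) = x + ((k + 1 : Nat) : Int) := by push_cast; ring
        have h2 : y - 1 - (k : Int) = y - ((k + 1 : Nat) : Int) := by push_cast; ring
        simp [Function.comp, Nat.succ_eq_add_one, h1, h2]
      rw [hp, List.range_succ_eq_map, List.countP_cons, List.countP_map]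
      by_cases hg : pvGet buf x = y <;> simp [hg] <;> omega

-- characterisations of A's three helpers
lemma CountRow_eq (buf : List Int) (i : Int) :
    CountRow i buf = (rowN buf (pvGet buf i) : Int) := by
  unfold CountRow rowN
  rw [PySem.List.foldl_ite_add_one (fun j => pvGet buf j = pvGet buf i), pyRange8, List.countP_map]
  rw [List.countP_congr (q := fun (j : Nat) => decide (pvGet buf (j : Int) = pvGet buf i))
      (by intro j _; rw [Bool.eq_iff_iff]; simp [Function.comp])]
  simp

lemma CountLeftDiagonal_eq (buf : List Int) (i : Int) :
    CountLeftDiagonal i buf = (ldN buf (pvGet buf i - i) : Int) := by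
  unfold CountLeftDiagonal ldN
  set v := pvGet buf i with hv
  by_cases hb : i < v
  · rw [if_pos hb, cldUpLoop_eq buf (8 - (v - i)).toNat 8 0 (v - i) 0 rfl (by omega)]
    rw [countP_range_shift _
        (fun (j : Nat) => decide ((0 ≤ pvGet buf (j:Int) ∧ pvGet buf (j:Int) < 8) ∧
          pvGet buf (j:Int) - (j:Int) = v - i))
        0 (8 - (v - i)).toNat 8 (by omega)
      (fun k hk => by rw [Bool.eq_iff_iff]; simp; omega)
      (fun j hj hout => by simp; omega)]
    simp
  · rw [if_neg hb, cldXLoop_eq buf (8 - (i - v)).toNat 8 (i - v) 0 0 rfl (by omega)]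
    have hnn : 0 ≤ i - v := by omega
    by_cases hbig : 8 ≤ i - v
    · rw [show (8 - (i - v)).toNat = 0 by omega]
      have hz : (List.range 8).countP (fun (j : Nat) =>
          decide ((0 ≤ pvGet buf (j:Int) ∧ pvGet buf (j:Int) < 8) ∧
            pvGet buf (j:Int) - (j:Int) = v - i)) = 0 := by
        rw [List.countP_eq_zero]
        intro j hj
        simp only [List.mem_range] at hj
        simp
        omega
      rw [hz]
      simp
    · rw [countP_range_shift _
          (fun (j : Nat) => decide ((0 ≤ pvGet buf (j:Int) ∧ pvGet buf (j:Int) < 8) ∧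
            pvGet buf (j:Int) - (j:Int) = v - i))
          (i - v).toNat (8 - (i - v)).toNat 8 (by omega)
        (fun k hk => by
          have hik : (((i - v).toNat + k : Nat) : Int) = (i - v) + (k : Int) := by push_cast; omega
          rw [Bool.eq_iff_iff]
          simp [hik]
          omega)
        (fun j hj hout => by simp; omega)]
      simp

lemma CountRightDiagonal_eq (buf : List Int) (i : Int) :
    CountRightDiagonal i buf = (rdN buf (pvGet buf i + i) : Int) := by
  unfold CountRightDiagonal rdN
  set v := pvGet buf i with hv
  by_cases hb : 7 - i < v
  · rw [if_pos hb, crdXLoop_eq buf (8 - (i - 7 + v)).toNat 8 (i - 7 + v) 7 0 rfl (by omega)]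
    have hpos : 1 ≤ i - 7 + v := by omega
    by_cases hbig : 8 ≤ i - 7 + v
    · rw [show (8 - (i - 7 + v)).toNat = 0 by omega]
      have hz : (List.range 8).countP (fun (j : Nat) =>
          decide ((0 ≤ pvGet buf (j:Int) ∧ pvGet buf (j:Int) < 8) ∧
            pvGet buf (j:Int) + (j:Int) = v + i)) = 0 := by
        rw [List.countP_eq_zero]
        intro j hj
        simp only [List.mem_range] at hj
        simp
        omega
      rw [hz]
      simp
    · rw [countP_range_shift _
          (fun (j : Nat) => decide ((0 ≤ pvGet buf (j:Int) ∧ pvGet buf (j:Int) < 8) ∧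
            pvGet buf (j:Int) + (j:Int) = v + i))
          (i - 7 + v).toNat (8 - (i - 7 + v)).toNat 8 (by omega)
        (fun k hk => by
          have hik : (((i - 7 + v).toNat + k : Nat) : Int) = (i - 7 + v) + (k : Int) := by
            push_cast; omega
          rw [Bool.eq_iff_iff]
          simp [hik]
          omega)
        (fun j hj hout => by simp; omega)]
      simp
  · rw [if_neg hb, crdYLoop_eq buf (v + i + 1).toNat 8 0 (v + i) 0 rfl (by omega)]
    rw [countP_range_shift _
        (fun (j : Nat) => decide ((0 ≤ pvGet buf (j:Int) ∧ pvGet buf (j:Int) < 8) ∧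
          pvGet buf (j:Int) + (j:Int) = v + i))
        0 (v + i + 1).toNat 8 (by omega)
      (fun k hk => by rw [Bool.eq_iff_iff]; simp; omega)
      (fun j hj hout => by simp; omega)]
    simp

-- A's outer while-loop, as a count of safe queens
lemma eqsLoop_eq (buf : List Int) : ∀ (n fuel : Nat) (i count : Int), (8 - i).toNat = n → n ≤ fuel →
    eqsLoop buf fuel i count = count +
      ((List.range n).countP (fun (k : Nat) => safeB buf (i + (k:Int))) : Int) := by
  intro n
  induction n with
  | zero =>
      intro fuel i count h hf
      cases fuel with
      | zero => simp [eqsLoop]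
      | succ f =>
          rw [show eqsLoop buf (f + 1) i count = if i < 8 then eqsLoop buf f (i + 1)
      (if CountRow i buf = 1 then
        (if CountLeftDiagonal i buf = 1 then
          (if CountRightDiagonal i buf = 1 then count + 1 else count)
        else count)
      else count) else count from rfl, if_neg (by omega)]
          simp
  | succ n ih =>
      intro fuel i count h hf
      obtain ⟨f, rfl⟩ : ∃ f, fuel = f + 1 := ⟨fuel - 1, by omega⟩
      rw [show eqsLoop buf (f + 1) i count = if i < 8 then eqsLoop buf f (i + 1)
      (if CountRow i buf = 1 then
        (if CountLeftDiagonal i buf = 1 then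
          (if CountRightDiagonal i buf = 1 then count + 1 else count)
        else count)
      else count) else count from rfl, if_pos (by omega), ih f (i + 1) _ (by omega) (by omega)]
      have hp : (List.range n).countP (fun (k : Nat) => safeB buf (i + 1 + (k:Int))) =
          (List.range n).countP ((fun (k : Nat) => safeB buf (i + (k:Int))) ∘ Nat.succ) := by
        apply List.countP_congr
        intro k _
        have h1 : i + 1 + (k : Int) = i + ((k + 1 : Nat) : Int) := by push_cast; ring
        simp [Function.comp, Nat.succ_eq_add_one, h1]
      have hhead : (if CountRow i buf = 1 then
            (if CountLeftDiagonal i buf = 1 then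
              (if CountRightDiagonal i buf = 1 then count + 1 else count)
            else count)
          else count) = count + (if safeB buf i then (1 : Int) else 0) := by
        rw [CountRow_eq, CountLeftDiagonal_eq, CountRightDiagonal_eq]
        simp only [safeB, Nat.cast_eq_one, decide_eq_true_eq]
        by_cases hr : rowN buf (pvGet buf i) = 1 <;>
          by_cases hl : ldN buf (pvGet buf i - i) = 1 <;>
          by_cases hd : rdN buf (pvGet buf i + i) = 1 <;>
          simp [hr, hl, hd]
      rw [hp, hhead, List.range_succ_eq_map, List.countP_cons, List.countP_map]
      simp only [Nat.cast_zero, add_zero]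
      by_cases hsafe : safeB buf i = true <;> simp [hsafe] <;> omega

-- a fold inserting key c ↦ f c for every c of a list: lookup gives f k on members
lemma getD_foldl_insert_fn (f : Int → Int) (k : Int) :
    ∀ (ks : List Int) (d0 : PySem.Dict Int Int),
      (ks.foldl (fun d c => d.insert c (f c)) d0).getD k 0 =
        if k ∈ ks then f k else d0.getD k 0 := by
  intro ks
  induction ks using List.reverseRecOn with
  | nil => intro d0; simp
  | append_singleton ks c ih =>
      intro d0
      rw [List.foldl_append, List.foldl_cons, List.foldl_nil, PySem.Dict.getD_insert, ih]
      by_cases hkc : k = c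
      · simp [hkc]
      · by_cases hks : k ∈ ks <;> simp [hkc, hks]

-- the row table
lemma rows_getD_eq (buf : List Int) (v : Int) :
    (bRows buf).getD v 0 = (rowN buf v : Int) := by
  unfold bRows rowN
  rw [← List.foldl_map (f := pvGet buf) (g := fun d x => d.insert x (d.getD x 0 + 1))
      (l := PySem.List.pyRange 0 8 1) (init := (PySem.Dict.empty : PySem.Dict Int Int))]
  rw [PySem.Dict.getD_foldl_insert_add_one, List.count_eq_countP, List.countP_map,
      pyRange8, List.countP_map, PySem.Dict.getD_empty]
  rw [List.countP_congr (q := fun (j : Nat) => decide (pvGet buf (j : Int) = v))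
      (by intro j _; rw [Bool.eq_iff_iff]; simp [Function.comp])]
  simp

-- the walk of one left diagonal counts exactly its board occupancy
lemma ldn_eq (buf : List Int) (c : Int) (h1 : -7 ≤ c) (h2 : c < 8) :
    ldn buf c = (ldN buf c : Int) := by
  unfold ldn ldN
  rw [PySem.List.foldl_ite_add_one (fun x => pvGet buf x = x + c),
      PySem.List.pyRange_one, List.countP_map]
  rw [countP_range_shift _
      (fun (j : Nat) => decide ((0 ≤ pvGet buf (j:Int) ∧ pvGet buf (j:Int) < 8) ∧
        pvGet buf (j:Int) - (j:Int) = c))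
      (max 0 (-c)).toNat (min 8 (8 - c) - max 0 (-c)).toNat 8 (by omega)
    (fun k hk => by
      have hik : (((max 0 (-c)).toNat + k : Nat) : Int) = max 0 (-c) + (k : Int) := by
        push_cast; omega
      rw [Bool.eq_iff_iff]
      simp [hik]
      omega)
    (fun j hj hout => by simp; omega)]
  simp

lemma ldN_zero (buf : List Int) (c : Int) (h : c < -7 ∨ 7 < c) : ldN buf c = 0 := by
  unfold ldN
  rw [List.countP_eq_zero]
  intro j hj
  simp only [List.mem_range] at hj
  simp
  omega

lemma ldiag_getD_eq (buf : List Int) (c : Int) :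
    (bLdiag buf).getD c 0 = (ldN buf c : Int) := by
  unfold bLdiag
  rw [getD_foldl_insert_fn]
  by_cases hmem : c ∈ PySem.List.pyRange (-7) 8 1
  · have hb := (PySem.List.mem_pyRange_one (x := c) (a := -7) (b := 8)).mp hmem
    rw [if_pos hmem, ldn_eq buf c hb.1 hb.2]
  · have hb : ¬(-7 ≤ c ∧ c < 8) := fun h =>
      hmem ((PySem.List.mem_pyRange_one (x := c) (a := -7) (b := 8)).mpr h)
    rw [if_neg hmem, PySem.Dict.getD_empty, ldN_zero buf c (by omega)]
    simp

-- the walk of one anti-diagonal counts exactly its board occupancy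
lemma rdn_eq (buf : List Int) (s : Int) (h1 : 0 ≤ s) (h2 : s < 15) :
    rdn buf s = (rdN buf s : Int) := by
  unfold rdn rdN
  rw [PySem.List.foldl_ite_add_one (fun x => pvGet buf x = s - x),
      PySem.List.pyRange_one, List.countP_map]
  rw [countP_range_shift _
      (fun (j : Nat) => decide ((0 ≤ pvGet buf (j:Int) ∧ pvGet buf (j:Int) < 8) ∧
        pvGet buf (j:Int) + (j:Int) = s))
      (max 0 (s - 7)).toNat (min 8 (s + 1) - max 0 (s - 7)).toNat 8 (by omega)
    (fun k hk => by
      have hik : (((max 0 (s - 7)).toNat + k : Nat) : Int) = max 0 (s - 7) + (k : Int) := by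
        push_cast; omega
      rw [Bool.eq_iff_iff]
      simp [hik]
      omega)
    (fun j hj hout => by simp; omega)]
  simp

lemma rdN_zero (buf : List Int) (s : Int) (h : s < 0 ∨ 14 < s) : rdN buf s = 0 := by
  unfold rdN
  rw [List.countP_eq_zero]
  intro j hj
  simp only [List.mem_range] at hj
  simp
  omega

lemma rdiag_getD_eq (buf : List Int) (s : Int) :
    (bRdiag buf).getD s 0 = (rdN buf s : Int) := by
  unfold bRdiag
  rw [getD_foldl_insert_fn]
  by_cases hmem : s ∈ PySem.List.pyRange 0 15 1
  · have hb := (PySem.List.mem_pyRange_one (x := s) (a := 0) (b := 15)).mp hmem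
    rw [if_pos hmem, rdn_eq buf s hb.1 hb.2]
  · have hb : ¬(0 ≤ s ∧ s < 15) := fun h =>
      hmem ((PySem.List.mem_pyRange_one (x := s) (a := 0) (b := 15)).mpr h)
    rw [if_neg hmem, PySem.Dict.getD_empty, rdN_zero buf s (by omega)]
    simp

-- ===== VERDICT (by name: the statement is the Claim_ definition above) =====
theorem EightQueensAreSafe_spec : Claim_equal_EightQueensAreSafe := by
  intro buf _ _
  unfold Spec_EightQueensAreSafe EightQueensAreSafe EightQueensAreSafe_alt
  rw [eqsLoop_eq buf 8 8 0 0 rfl (by omega)]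
  rw [PySem.List.foldl_ite_add_one
      (fun i => (bRows buf).getD (pvGet buf i) 0 = 1 ∧ (bLdiag buf).getD (pvGet buf i - i) 0 = 1 ∧
        (bRdiag buf).getD (pvGet buf i + i) 0 = 1), pyRange8, List.countP_map]
  rw [List.countP_congr (p := fun (k : Nat) => safeB buf (0 + (k : Int)))
      (q := ((fun i => decide ((bRows buf).getD (pvGet buf i) 0 = 1 ∧
        (bLdiag buf).getD (pvGet buf i - i) 0 = 1 ∧
        (bRdiag buf).getD (pvGet buf i + i) 0 = 1)) ∘ fun (k : Nat) => (k : Int)))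
      (by
        intro k _
        rw [Bool.eq_iff_iff]
        simp [safeB, Function.comp, rows_getD_eq, ldiag_getD_eq, rdiag_getD_eq,
          Nat.cast_eq_one])]
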